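-- pv_equiv track=rewrite | github.com/atarijookie/ce-atari | ce_conf_py/screen_network.py | ip_prefix_to_netmask
-- ===== SOURCE A (Python) =====
-- def ip_prefix_to_netmask(prefix):
--     """ convert IP prefix number to netmask, e.g. 24 to 255.255.255.0 """
--     prefix = int(prefix)        # from str to int if needed
--
--     mask_binary = ""
--
--     for i in range(32):         # generate binary string, e.g. 11111111111110000
--         mask_binary += '1' if i < prefix else '0'
--
--         if i in [7, 15, 23]:    # separate bytes with columns
--             mask_binary += ':'
--
--     parts = mask_binary.split(':')  # split to individual bytes
--
--     for i in range(4):              # from binary to decimal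
--         parts[i] = str(int(parts[i], 2))
--
--     mask = ".".join(parts)          # individual decimal numbers to net.mask.with.dots
--     return mask
-- ===== SOURCE B (Python) =====
-- def ip_prefix_to_netmask(prefix):
--     """ convert IP prefix number to netmask, e.g. 24 to 255.255.255.0 """
--     prefix = int(prefix)
--
--     parts = []
--     for i in range(4):                      # one octet at a time
--         ones = min(max(prefix - 8 * i, 0), 8)   # leading one-bits in this octet
--         parts.append(str(256 - (1 << (8 - ones))))
--
--     return ".".join(parts)
-- ===== Notes on version B (the rewrite author's own statement) =====
-- stated objective: idiomatic
-- what changed: replaces the 32-bit binary-string assembly, colon splitting and base-2 reparsing with direct per-octet arithmetic (clamped one-bit count and 256 - 2^(8-ones)) over a 4-iteration loop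
import Mathlib
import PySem

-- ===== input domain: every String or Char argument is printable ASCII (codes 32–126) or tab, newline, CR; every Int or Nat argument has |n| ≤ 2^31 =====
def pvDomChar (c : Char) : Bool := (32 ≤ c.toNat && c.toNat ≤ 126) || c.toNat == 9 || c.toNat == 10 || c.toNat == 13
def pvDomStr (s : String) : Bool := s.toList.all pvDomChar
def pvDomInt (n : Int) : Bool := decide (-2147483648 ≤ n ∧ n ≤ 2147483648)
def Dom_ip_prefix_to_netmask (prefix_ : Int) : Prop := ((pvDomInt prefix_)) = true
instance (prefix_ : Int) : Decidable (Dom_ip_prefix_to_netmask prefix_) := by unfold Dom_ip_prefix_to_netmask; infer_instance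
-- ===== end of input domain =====

-- B replaces A's 32-bit binary-string assembly + base-2 reparsing with per-octet arithmetic (idiomatic; same results).

-- ===== PORT A =====
def ip_prefix_to_netmask (prefix_ : Int) : String :=
  -- mask_binary built bit by bit, ':' after bits 7, 15, 23
  let mask_binary : List Char :=
    (PySem.List.pyRange 0 32 1).foldl (fun s i =>
      let s := s ++ (if i < prefix_ then ['1'] else ['0'])
      if i ∈ ([7, 15, 23] : List Int) then s ++ [':'] else s) []
  let parts : List (List Char) := PySem.Chars.splitOn mask_binary [':']
  -- parts[i] = str(int(parts[i], 2)) for i in range(4); int(·,2) never raises here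
  -- (each part is a nonempty 0/1 string), so the none branch is unreachable
  let parts : List (List Char) :=
    (PySem.List.pyRange 0 4 1).map (fun i =>
      PySem.Int.toChars ((PySem.Int.ofCharsBase? (PySem.List.pyGetD parts i []) 2).getD 0))
  String.ofList (PySem.Chars.join ['.'] parts)

-- ===== PORT B =====
def ip_prefix_to_netmask_alt (prefix_ : Int) : String :=
  let parts : List (List Char) :=
    (PySem.List.pyRange 0 4 1).foldl (fun acc i =>
      let ones : Int := min (max (prefix_ - 8 * i) 0) 8
      acc ++ [PySem.Int.toChars (256 - (1 <<< (8 - ones).toNat))]) []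
  String.ofList (PySem.Chars.join ['.'] parts)

-- ===== PRECONDITION & SPEC =====
def Spec_ip_prefix_to_netmask (prefix_ : Int) (out : String) : Prop := out = ip_prefix_to_netmask_alt prefix_
instance (prefix_ : Int) (out : String) : Decidable (Spec_ip_prefix_to_netmask prefix_ out) := by unfold Spec_ip_prefix_to_netmask; infer_instance

-- ===== CLAIM (what is proved, stated in full; the proofs are below) =====
def Claim_equal_ip_prefix_to_netmask : Prop := ∀ (prefix_ : Int), Dom_ip_prefix_to_netmask prefix_ → Spec_ip_prefix_to_netmask prefix_ (ip_prefix_to_netmask prefix_)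

-- ===== LEMMAS AND PROOFS =====

-- both programs depend only on the prefix clamped to [0, 32]
def pvClamp (p : Int) : Int := max 0 (min p 32)

theorem pvA_clamp (p : Int) : ip_prefix_to_netmask p = ip_prefix_to_netmask (pvClamp p) := by
  unfold ip_prefix_to_netmask
  have h : (PySem.List.pyRange 0 32 1).foldl (fun s i =>
        let s := s ++ (if i < p then ['1'] else ['0'])
        if i ∈ ([7, 15, 23] : List Int) then s ++ [':'] else s) []
      = (PySem.List.pyRange 0 32 1).foldl (fun s i =>
        let s := s ++ (if i < pvClamp p then ['1'] else ['0'])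
        if i ∈ ([7, 15, 23] : List Int) then s ++ [':'] else s) [] := by
    apply PySem.List.foldl_congr_mem
    intro acc x hx
    rw [PySem.List.mem_pyRange_one] at hx
    have : (x < p) = (x < pvClamp p) := propext (by unfold pvClamp; omega)
    simp only [this]
  simp only [h]

theorem pvB_clamp (p : Int) : ip_prefix_to_netmask_alt p = ip_prefix_to_netmask_alt (pvClamp p) := by
  unfold ip_prefix_to_netmask_alt
  have h : (PySem.List.pyRange 0 4 1).foldl (fun acc i =>
        acc ++ [PySem.Int.toChars (256 - (1 <<< (8 - min (max (p - 8 * i) 0) 8).toNat))]) []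
      = (PySem.List.pyRange 0 4 1).foldl (fun acc i =>
        acc ++ [PySem.Int.toChars (256 - (1 <<< (8 - min (max (pvClamp p - 8 * i) 0) 8).toNat))]) [] := by
    apply PySem.List.foldl_congr_mem
    intro acc x hx
    rw [PySem.List.mem_pyRange_one] at hx
    have : min (max (p - 8 * x) 0) 8 = min (max (pvClamp p - 8 * x) 0) 8 := by
      unfold pvClamp; omega
    rw [this]
  simp only [h]

theorem pvEq_clamped (q : Int) (h0 : 0 ≤ q) (h32 : q ≤ 32) :
    ip_prefix_to_netmask q = ip_prefix_to_netmask_alt q := by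
  interval_cases q <;> decide

-- ===== VERDICT (by name: the statement is the Claim_ definition above) =====
theorem ip_prefix_to_netmask_spec : Claim_equal_ip_prefix_to_netmask := by
  intro p _
  unfold Spec_ip_prefix_to_netmask
  rw [pvA_clamp p, pvB_clamp p]
  exact pvEq_clamped (pvClamp p) (by unfold pvClamp; omega) (by unfold pvClamp; omega)
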